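-- pv_equiv track=rewrite | github.com/tomasclaeys11/wolfofsaviostreet | app.py | get_constituents
-- ===== SOURCE A (Python) =====
-- BASE_STOCKS = {
--     "Nvidia": {"sector": "Tech", "region": "USA"}, "ASML": {"sector": "Tech", "region": "EU"}, "Samsung": {"sector": "Tech", "region": "WORLD"},
--     "ExxonMobil": {"sector": "Energy", "region": "USA"}, "TotalEnergies": {"sector": "Energy", "region": "EU"}, "CNOOC": {"sector": "Energy", "region": "WORLD"},
--     "Siemens": {"sector": "Industry", "region": "EU"}, "Caterpillar": {"sector": "Industry", "region": "USA"}, "Toyota": {"sector": "Industry", "region": "WORLD"},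
--     "Rheinmetall": {"sector": "Defense", "region": "EU"}, "Lockheed_Martin": {"sector": "Defense", "region": "USA"}, "Elbit_Systems": {"sector": "Defense", "region": "WORLD"},
--     "Novartis": {"sector": "Health", "region": "EU"}, "United_Health": {"sector": "Health", "region": "USA"}, "AstraZeneca": {"sector": "Health", "region": "EU"},
--     "Lotus_Bakeries": {"sector": "Consumer", "region": "EU"}, "Nike": {"sector": "Consumer", "region": "USA"}, "AB_Inbev": {"sector": "Consumer", "region": "EU"}
-- }
--
-- SECTORS = ["Tech", "Energy", "Industry", "Defense", "Health", "Consumer"]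
--
-- REGIONS = ["USA", "EU", "WORLD"]
--
-- def get_constituents(asset_name):
--     if asset_name.startswith("ETF_"):
--         cat = asset_name.replace("ETF_", "")
--         if cat in SECTORS: return [s for s, d in BASE_STOCKS.items() if d["sector"] == cat]
--         if cat in REGIONS:
--             if cat == "WORLD": return list(BASE_STOCKS.keys())
--             return [s for s, d in BASE_STOCKS.items() if d["region"] == cat]
--     return [asset_name]
-- ===== SOURCE B (Python) =====
-- BASE_STOCKS = {
--     "Nvidia": {"sector": "Tech", "region": "USA"}, "ASML": {"sector": "Tech", "region": "EU"}, "Samsung": {"sector": "Tech", "region": "WORLD"},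
--     "ExxonMobil": {"sector": "Energy", "region": "USA"}, "TotalEnergies": {"sector": "Energy", "region": "EU"}, "CNOOC": {"sector": "Energy", "region": "WORLD"},
--     "Siemens": {"sector": "Industry", "region": "EU"}, "Caterpillar": {"sector": "Industry", "region": "USA"}, "Toyota": {"sector": "Industry", "region": "WORLD"},
--     "Rheinmetall": {"sector": "Defense", "region": "EU"}, "Lockheed_Martin": {"sector": "Defense", "region": "USA"}, "Elbit_Systems": {"sector": "Defense", "region": "WORLD"},
--     "Novartis": {"sector": "Health", "region": "EU"}, "United_Health": {"sector": "Health", "region": "USA"}, "AstraZeneca": {"sector": "Health", "region": "EU"},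
--     "Lotus_Bakeries": {"sector": "Consumer", "region": "EU"}, "Nike": {"sector": "Consumer", "region": "USA"}, "AB_Inbev": {"sector": "Consumer", "region": "EU"}
-- }
--
-- # Prebuilt category index: one pass over BASE_STOCKS at import time.
-- INDEX = {}
-- for _s, _d in BASE_STOCKS.items():
--     INDEX.setdefault(_d["sector"], []).append(_s)
--     INDEX.setdefault(_d["region"], []).append(_s)
-- INDEX["WORLD"] = list(BASE_STOCKS)
--
-- def get_constituents(asset_name):
--     if asset_name.startswith("ETF_"):
--         cat = asset_name.replace("ETF_", "")
--         if cat in INDEX: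
--             return list(INDEX[cat])
--     return [asset_name]
-- ===== Notes on version B (the rewrite author's own statement) =====
-- stated objective: simpler
-- what changed: Replaces A's per-call list-membership tests plus two filtering comprehensions and the WORLD special case with a category->stocks index dict built once at module load; the function body becomes a single lookup with a fallback.
import Mathlib
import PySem

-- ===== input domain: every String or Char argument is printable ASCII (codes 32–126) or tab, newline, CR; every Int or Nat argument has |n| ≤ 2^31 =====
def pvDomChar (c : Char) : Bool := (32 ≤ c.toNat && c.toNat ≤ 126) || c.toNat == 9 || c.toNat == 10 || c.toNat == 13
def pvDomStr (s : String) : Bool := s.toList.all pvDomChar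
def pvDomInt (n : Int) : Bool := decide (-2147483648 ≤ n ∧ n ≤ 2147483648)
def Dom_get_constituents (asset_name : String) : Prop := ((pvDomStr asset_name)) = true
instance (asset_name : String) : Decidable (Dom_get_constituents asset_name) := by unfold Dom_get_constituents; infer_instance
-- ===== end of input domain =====

-- B replaces A's per-call membership tests, two filtering comprehensions and the WORLD
-- special case with a category→stocks index dict built once, so the call is one lookup (objective: simpler).

-- ===== PORT A =====
def sdict (s r : String) : PySem.Dict String String :=
  PySem.Dict.ofList [("sector", s), ("region", r)]

def BASE_STOCKS : PySem.Dict String (PySem.Dict String String) := PySem.Dict.ofList [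
  ("Nvidia", sdict "Tech" "USA"), ("ASML", sdict "Tech" "EU"), ("Samsung", sdict "Tech" "WORLD"),
  ("ExxonMobil", sdict "Energy" "USA"), ("TotalEnergies", sdict "Energy" "EU"), ("CNOOC", sdict "Energy" "WORLD"),
  ("Siemens", sdict "Industry" "EU"), ("Caterpillar", sdict "Industry" "USA"), ("Toyota", sdict "Industry" "WORLD"),
  ("Rheinmetall", sdict "Defense" "EU"), ("Lockheed_Martin", sdict "Defense" "USA"), ("Elbit_Systems", sdict "Defense" "WORLD"),
  ("Novartis", sdict "Health" "EU"), ("United_Health", sdict "Health" "USA"), ("AstraZeneca", sdict "Health" "EU"),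
  ("Lotus_Bakeries", sdict "Consumer" "EU"), ("Nike", sdict "Consumer" "USA"), ("AB_Inbev", sdict "Consumer" "EU")]

def SECTORS : List String := ["Tech", "Energy", "Industry", "Defense", "Health", "Consumer"]

def REGIONS : List String := ["USA", "EU", "WORLD"]

-- d["sector"] / d["region"] are ported with getD; both keys are present in every BASE_STOCKS value, so this is exact.
def get_constituents (asset_name : String) : List String :=
  if PySem.Str.startswith asset_name "ETF_" then
    let cat := PySem.Str.replace asset_name "ETF_" ""
    if SECTORS.contains cat then
      (BASE_STOCKS.items.filter (fun p => p.2.getD "sector" "" == cat)).map (·.1)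
    else if REGIONS.contains cat then
      if cat == "WORLD" then BASE_STOCKS.keys
      else (BASE_STOCKS.items.filter (fun p => p.2.getD "region" "" == cat)).map (·.1)
    else [asset_name]
  else [asset_name]

-- ===== PORT B =====
-- the module-level index build of Source B: one pass over BASE_STOCKS, then INDEX["WORLD"] = list(BASE_STOCKS)
def INDEX : PySem.Dict String (List String) :=
  (BASE_STOCKS.items.foldl (fun idx p =>
     (idx.modify (p.2.getD "sector" "") [] (· ++ [p.1])).modify (p.2.getD "region" "") [] (· ++ [p.1]))
    PySem.Dict.empty).insert "WORLD" BASE_STOCKS.keys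

def get_constituents_alt (asset_name : String) : List String :=
  if PySem.Str.startswith asset_name "ETF_" then
    let cat := PySem.Str.replace asset_name "ETF_" ""
    match INDEX.get? cat with
    | some l => l
    | none => [asset_name]
  else [asset_name]

-- ===== PRECONDITION & SPEC =====
def Spec_get_constituents (asset_name : String) (out : List String) : Prop := out = get_constituents_alt asset_name
instance (asset_name : String) (out : List String) : Decidable (Spec_get_constituents asset_name out) := by unfold Spec_get_constituents; infer_instance

-- ===== CLAIM (what is proved, stated in full; the proofs are below) =====
def Claim_equal_get_constituents : Prop := ∀ (asset_name : String), Dom_get_constituents asset_name → Spec_get_constituents asset_name (get_constituents asset_name)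

-- ===== LEMMAS AND PROOFS =====

-- the evaluated form of the one-pass index build
set_option maxRecDepth 8192 in
theorem INDEX_eval : INDEX = PySem.Dict.mk
    [("Tech", ["Nvidia", "ASML", "Samsung"]),
     ("USA", ["Nvidia", "ExxonMobil", "Caterpillar", "Lockheed_Martin", "United_Health", "Nike"]),
     ("EU", ["ASML", "TotalEnergies", "Siemens", "Rheinmetall", "Novartis", "AstraZeneca", "Lotus_Bakeries", "AB_Inbev"]),
     ("WORLD", ["Nvidia", "ASML", "Samsung", "ExxonMobil", "TotalEnergies", "CNOOC", "Siemens", "Caterpillar", "Toyota",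
                "Rheinmetall", "Lockheed_Martin", "Elbit_Systems", "Novartis", "United_Health", "AstraZeneca",
                "Lotus_Bakeries", "Nike", "AB_Inbev"]),
     ("Energy", ["ExxonMobil", "TotalEnergies", "CNOOC"]),
     ("Industry", ["Siemens", "Caterpillar", "Toyota"]),
     ("Defense", ["Rheinmetall", "Lockheed_Martin", "Elbit_Systems"]),
     ("Health", ["Novartis", "United_Health", "AstraZeneca"]),
     ("Consumer", ["Lotus_Bakeries", "Nike", "AB_Inbev"])] := by decide

-- ===== VERDICT (by name: the statement is the Claim_ definition above) =====
set_option maxRecDepth 8192 in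
theorem get_constituents_spec : Claim_equal_get_constituents := by
  intro a _
  show get_constituents a = get_constituents_alt a
  unfold get_constituents get_constituents_alt
  by_cases hs : PySem.Str.startswith a "ETF_" = true
  · simp only [hs, if_true]
    generalize PySem.Str.replace a "ETF_" "" = cat
    by_cases h1 : cat = "Tech"; · subst h1; rfl
    by_cases h2 : cat = "Energy"; · subst h2; rfl
    by_cases h3 : cat = "Industry"; · subst h3; rfl
    by_cases h4 : cat = "Defense"; · subst h4; rfl
    by_cases h5 : cat = "Health"; · subst h5; rfl
    by_cases h6 : cat = "Consumer"; · subst h6; rfl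
    by_cases h7 : cat = "USA"; · subst h7; rfl
    by_cases h8 : cat = "EU"; · subst h8; rfl
    by_cases h9 : cat = "WORLD"; · subst h9; rfl
    have hB : INDEX.get? cat = none := by
      rw [INDEX_eval]
      simp only [PySem.Dict.get?_mk_cons, beq_iff_eq]
      simp [Ne.symm h1, Ne.symm h2, Ne.symm h3, Ne.symm h4, Ne.symm h5, Ne.symm h6,
            Ne.symm h7, Ne.symm h8, Ne.symm h9, PySem.Dict.get?]
    simp [SECTORS, REGIONS, h1, h2, h3, h4, h5, h6, h7, h8, h9, hB]
  · rw [if_neg hs, if_neg hs]
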